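-- pv_equiv track=rewrite | github.com/tangyuanbo1/ICDE2025 | Experiment1_path_on_urban_road_network/code/utils.py | transform_tra
-- ===== SOURCE A (Python) =====
-- matrix_size = 5
--
-- def transform_tra(raw_tra,matrix_size):
--     tra_step1 = []
--     tra_step2 = []
--     for point in raw_tra:
--         tra_step1.append(point[0]*matrix_size*5+point[1])
--     for i in range(len(tra_step1)-1):
--     # for point in tra_step1:
--         if (tra_step1[i]!=tra_step1[i+1]):
--             tra_step2.append((tra_step1[i],tra_step1[i+1]))
--     return tra_step2
-- ===== SOURCE B (Python) =====
-- def transform_tra(raw_tra, matrix_size):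
--     result = []
--     first = True
--     prev = None
--     for point in raw_tra:
--         cur = point[0] * matrix_size * 5 + point[1]
--         if not first and cur != prev:
--             result.append((prev, cur))
--         prev = cur
--         first = False
--     return result
-- ===== Notes on version B (the rewrite author's own statement) =====
-- stated objective: simpler
-- what changed: Single fused pass over raw_tra keeping a running previous encoded value behind a first-iteration flag, instead of building an intermediate encoded list and then index-scanning adjacent pairs.
import Mathlib
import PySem

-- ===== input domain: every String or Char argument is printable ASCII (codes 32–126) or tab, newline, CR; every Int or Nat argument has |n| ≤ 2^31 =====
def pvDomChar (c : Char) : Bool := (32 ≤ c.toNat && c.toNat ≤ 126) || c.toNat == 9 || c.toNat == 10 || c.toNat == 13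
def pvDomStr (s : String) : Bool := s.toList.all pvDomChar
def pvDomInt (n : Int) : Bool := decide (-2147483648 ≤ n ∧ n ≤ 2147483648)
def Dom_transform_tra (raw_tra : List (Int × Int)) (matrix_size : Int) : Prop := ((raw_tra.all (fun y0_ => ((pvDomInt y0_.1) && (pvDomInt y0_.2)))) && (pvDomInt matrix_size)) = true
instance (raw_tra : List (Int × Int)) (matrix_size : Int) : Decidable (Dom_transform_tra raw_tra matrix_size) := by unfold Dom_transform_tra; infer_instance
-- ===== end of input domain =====

-- B fuses A's two passes into one pass with a running previous encoded value (flag via Option); same return value, no speed claim.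

-- ===== PORT A =====
-- tra_step1 = [p[0]*matrix_size*5 + p[1] for p in raw_tra]; then scan indices 0..len-2
-- (tra_step1[i] ported as pyGetD with default 0: every index drawn from range(len-1) is in range, so the default is never read)
def transform_tra (raw_tra : List (Int × Int)) (matrix_size : Int) : List (Int × Int) :=
  let tra_step1 : List Int := raw_tra.map (fun point => point.1 * matrix_size * 5 + point.2)
  (PySem.List.pyRange 0 ((tra_step1.length : Int) - 1) 1).foldl
    (fun tra_step2 i =>
      if PySem.List.pyGetD tra_step1 i 0 ≠ PySem.List.pyGetD tra_step1 (i + 1) 0 then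
        tra_step2 ++ [(PySem.List.pyGetD tra_step1 i 0, PySem.List.pyGetD tra_step1 (i + 1) 0)]
      else tra_step2)
    []

-- ===== PORT B =====
-- one pass; `none` plays the role of Source B's `first` flag (prev is unset before the first point)
def transformTraAltLoop (matrix_size : Int) (prev : Option Int) (result : List (Int × Int)) :
    List (Int × Int) → List (Int × Int)
  | [] => result
  | point :: rest =>
    let cur := point.1 * matrix_size * 5 + point.2
    let result' :=
      match prev with
      | none => result
      | some p => if cur ≠ p then result ++ [(p, cur)] else result
    transformTraAltLoop matrix_size (some cur) result' rest

def transform_tra_alt (raw_tra : List (Int × Int)) (matrix_size : Int) : List (Int × Int) :=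
  transformTraAltLoop matrix_size none [] raw_tra

-- ===== PRECONDITION & SPEC =====
def Spec_transform_tra (raw_tra : List (Int × Int)) (matrix_size : Int) (out : List (Int × Int)) : Prop := out = transform_tra_alt raw_tra matrix_size
instance (raw_tra : List (Int × Int)) (matrix_size : Int) (out : List (Int × Int)) : Decidable (Spec_transform_tra raw_tra matrix_size out) := by unfold Spec_transform_tra; infer_instance

-- ===== CLAIM (what is proved, stated in full; the proofs are below) =====
def Claim_equal_transform_tra : Prop := ∀ (raw_tra : List (Int × Int)) (matrix_size : Int), Dom_transform_tra raw_tra matrix_size → Spec_transform_tra raw_tra matrix_size (transform_tra raw_tra matrix_size)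

-- ===== LEMMAS AND PROOFS =====

-- canonical form: adjacent distinct pairs of a list of encodings
def pvAdjPairs : List Int → List (Int × Int)
  | x :: y :: r => (if x ≠ y then [(x, y)] else []) ++ pvAdjPairs (y :: r)
  | _ => []

-- B's loop with prev = some x computes the adjacent pairs of (x :: encodings), appended to the accumulator
lemma altLoop_eq_adjPairs (ms : Int) :
    ∀ (l : List (Int × Int)) (x : Int) (acc : List (Int × Int)),
      transformTraAltLoop ms (some x) acc l
        = acc ++ pvAdjPairs (x :: l.map (fun p => p.1 * ms * 5 + p.2)) := by
  intro l
  induction l with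
  | nil => intro x acc; simp [transformTraAltLoop, pvAdjPairs]
  | cons p rest ih =>
      intro x acc
      simp only [transformTraAltLoop, List.map_cons, pvAdjPairs]
      by_cases h : p.1 * ms * 5 + p.2 = x
      · simp [h, ih]
      · simp [h, Ne.symm h, ih]

-- A's index scan over l computes the adjacent pairs of l, appended to the accumulator
lemma rangeScan_eq_adjPairs :
    ∀ (l : List Int) (acc : List (Int × Int)),
      (List.range (l.length - 1)).foldl
        (fun a i => if l.getD i 0 ≠ l.getD (i + 1) 0 then a ++ [(l.getD i 0, l.getD (i + 1) 0)] else a) acc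
        = acc ++ pvAdjPairs l := by
  intro l
  induction l with
  | nil => intro acc; simp [pvAdjPairs]
  | cons x rest ih =>
      intro acc
      cases rest with
      | nil => simp [pvAdjPairs]
      | cons y r =>
          have hlen : (x :: y :: r).length - 1 = (y :: r).length - 1 + 1 := by
            simp
          rw [hlen, List.range_succ_eq_map, List.foldl_cons, List.foldl_map]
          simp only [Nat.succ_eq_add_one, List.getD_cons_succ, List.getD_cons_zero]
          have hshift :
              (fun (a : List (Int × Int)) (i : Nat) =>
                  if (y :: r).getD i 0 ≠ r.getD i 0 then
                    a ++ [((y :: r).getD i 0, r.getD i 0)]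
                  else a)
                = (fun (a : List (Int × Int)) (i : Nat) =>
                  if (y :: r).getD i 0 ≠ (y :: r).getD (i + 1) 0 then
                    a ++ [((y :: r).getD i 0, (y :: r).getD (i + 1) 0)]
                  else a) := by
            funext a i; simp
          rw [hshift, ih]
          by_cases h : x = y
          · simp [pvAdjPairs, h]
          · simp [pvAdjPairs, h]

-- the same index scan, stated on the pyRange/pyGetD form A's port uses
lemma pyScan_eq_adjPairs (l : List Int) :
    (PySem.List.pyRange 0 ((l.length : Int) - 1) 1).foldl
      (fun a i =>
        if PySem.List.pyGetD l i 0 ≠ PySem.List.pyGetD l (i + 1) 0 then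
          a ++ [(PySem.List.pyGetD l i 0, PySem.List.pyGetD l (i + 1) 0)]
        else a) []
      = pvAdjPairs l := by
  cases l with
  | nil => decide
  | cons x t =>
      have hb : (((x :: t).length : Int) - 1) = ((t.length : Nat) : Int) := by
        push_cast [List.length_cons]; ring
      rw [hb, PySem.List.pyRange_one, Int.sub_zero, Int.toNat_natCast, List.foldl_map]
      have hfun : (fun (a : List (Int × Int)) (k : Nat) =>
          if PySem.List.pyGetD (x :: t) ((0 : Int) + k) 0 ≠ PySem.List.pyGetD (x :: t) ((0 : Int) + k + 1) 0 then
            a ++ [(PySem.List.pyGetD (x :: t) ((0 : Int) + k) 0, PySem.List.pyGetD (x :: t) ((0 : Int) + k + 1) 0)]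
          else a)
          = (fun (a : List (Int × Int)) (i : Nat) =>
            if (x :: t).getD i 0 ≠ (x :: t).getD (i + 1) 0 then
              a ++ [((x :: t).getD i 0, (x :: t).getD (i + 1) 0)]
            else a) := by
        funext a k
        have h1 : ((0 : Int) + k) = ((k : Nat) : Int) := by omega
        rw [h1]
        rw [show ((k : Int) + 1) = (((k + 1 : Nat)) : Int) by push_cast; ring]
        rw [PySem.List.pyGetD_natCast, PySem.List.pyGetD_natCast]
      have hlen : t.length = (x :: t).length - 1 := by simp
      rw [hfun, hlen, rangeScan_eq_adjPairs, List.nil_append]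

-- A's port reduces to the canonical adjacent-pairs form
lemma transform_tra_eq_adjPairs (raw_tra : List (Int × Int)) (ms : Int) :
    transform_tra raw_tra ms = pvAdjPairs (raw_tra.map (fun p => p.1 * ms * 5 + p.2)) := by
  unfold transform_tra
  rw [pyScan_eq_adjPairs]

-- ===== VERDICT (by name: the statement is the Claim_ definition above) =====
theorem transform_tra_spec : Claim_equal_transform_tra := by
  intro raw_tra ms _
  unfold Spec_transform_tra
  rw [transform_tra_eq_adjPairs]
  cases raw_tra with
  | nil => rfl
  | cons p rest =>
      show pvAdjPairs ((p :: rest).map (fun q => q.1 * ms * 5 + q.2))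
        = transformTraAltLoop ms none [] (p :: rest)
      simp only [transformTraAltLoop]
      rw [altLoop_eq_adjPairs, List.nil_append, List.map_cons]
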